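-- pv_equiv track=rewrite | github.com/submissionanonymous4-byte/intellidoc | backend/templates/security/validation_system.py | _validate_version_format
-- ===== SOURCE A (Python) =====
-- def _validate_version_format(version: str) -> bool:
--     """Validate version format (semantic versioning)"""
--     if not version or not isinstance(version, str):
--         return False
--
--     # Simple semantic versioning check
--     parts = version.split('.')
--     if len(parts) != 3:
--         return False
--
--     for part in parts:
--         if not part.isdigit():
--             return False
--
--     return True
-- ===== SOURCE B (Python) =====
-- def _validate_version_format(version: str) -> bool:
--     """One-pass scan: count dots, require digit-only non-empty segments."""
--     dots = 0
--     seg = False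
--     for ch in version:
--         if ch == '.':
--             if not (seg and dots < 2):
--                 return False
--             dots += 1
--             seg = False
--         elif ch.isdigit():
--             seg = True
--         else:
--             return False
--     return dots == 2 and seg
-- ===== Notes on version B (the rewrite author's own statement) =====
-- stated objective: alternative
-- what changed: Replaces split-on-dot + length check + per-part isdigit loop by a single character scan maintaining a dot count and a current-segment-nonempty flag, exiting on the first bad character.
import Mathlib
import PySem

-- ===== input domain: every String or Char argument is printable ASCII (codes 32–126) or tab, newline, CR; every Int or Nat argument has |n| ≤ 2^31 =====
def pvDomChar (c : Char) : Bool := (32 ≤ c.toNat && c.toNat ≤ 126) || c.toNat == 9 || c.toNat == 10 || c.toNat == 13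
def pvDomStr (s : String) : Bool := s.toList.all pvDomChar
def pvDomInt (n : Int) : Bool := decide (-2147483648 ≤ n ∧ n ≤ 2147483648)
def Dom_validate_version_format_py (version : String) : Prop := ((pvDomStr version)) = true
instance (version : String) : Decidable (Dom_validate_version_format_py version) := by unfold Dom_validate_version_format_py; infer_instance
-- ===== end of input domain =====

-- B replaces split('.') + length check + per-part digit loop by one character scan with a dot counter and a segment flag (no intermediate list, early exit).

-- ===== PORT A =====
-- the 'for part in parts' loop with its early 'return False'
def pvLoopA : List (List Char) → Bool
  | [] => true
  | p :: ps => if !PySem.Chars.strIsdigit p then false else pvLoopA ps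

def validate_version_format_py (version : String) : Bool :=
  if version.toList.isEmpty then false   -- 'not version' (isinstance(version, str) always holds under the type convention)
  else
    let parts := PySem.Chars.splitOn version.toList ['.']   -- version.split('.')
    if parts.length != 3 then false
    else pvLoopA parts

-- ===== PORT B =====
-- one pass: dots = dots seen so far, seg = current segment non-empty (every char seen was a digit, else early False)
def pvScanB : List Char → Nat → Bool → Bool
  | [], dots, seg => dots == 2 && seg
  | c :: rest, dots, seg =>
    if c = '.' then
      if seg && dots < 2 then pvScanB rest (dots + 1) false else false
    else if PySem.Chars.isdigit c then pvScanB rest dots true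
    else false

def validate_version_format_py_alt (version : String) : Bool :=
  pvScanB version.toList 0 false

-- ===== PRECONDITION & SPEC =====
def Spec_validate_version_format_py (version : String) (out : Bool) : Prop := out = validate_version_format_py_alt version
instance (version : String) (out : Bool) : Decidable (Spec_validate_version_format_py version out) := by unfold Spec_validate_version_format_py; infer_instance

-- ===== CLAIM (what is proved, stated in full; the proofs are below) =====
def Claim_equal_validate_version_format_py : Prop := ∀ (version : String), Dom_validate_version_format_py version → Spec_validate_version_format_py version (validate_version_format_py version)

-- ===== LEMMAS AND PROOFS =====

-- reference splitter: split on '.' keeping empty pieces (what splitOn computes for sep = ['.'])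
def pvSplitDot : List Char → List (List Char)
  | [] => [[]]
  | c :: rest =>
    if c = '.' then [] :: pvSplitDot rest
    else
      match pvSplitDot rest with
      | [] => [[c]]
      | h :: t => (c :: h) :: t

theorem pvSplitDot_ne_nil (l : List Char) : pvSplitDot l ≠ [] := by
  cases l with
  | nil => simp [pvSplitDot]
  | cons c rest =>
    simp only [pvSplitDot]
    split
    · simp
    · split <;> simp

theorem pvGo_eq (l : List Char) : ∀ (fuel : Nat) (cur : List Char) (acc : List (List Char)),
    l.length ≤ fuel →
    PySem.Chars.splitOn.go ['.'] fuel l cur acc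
      = acc.reverse ++ (pvSplitDot l).modifyHead (cur.reverse ++ ·) := by
  induction l with
  | nil =>
    intro fuel cur acc _
    cases fuel <;> simp [PySem.Chars.splitOn.go, pvSplitDot]
  | cons c rest ih =>
    intro fuel cur acc hfuel
    cases fuel with
    | zero => simp at hfuel
    | succ f =>
      have hf : rest.length ≤ f := by simp at hfuel; omega
      by_cases hc : c = '.'
      · subst hc
        have hpre : List.isPrefixOf ['.'] ('.' :: rest) = true := by simp [List.isPrefixOf]
        simp only [PySem.Chars.splitOn.go, hpre, if_true, List.drop_succ_cons, List.drop_zero,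
          List.length_singleton]
        rw [ih f [] (cur.reverse :: acc) hf]
        obtain ⟨h, t, heq⟩ : ∃ h t, pvSplitDot rest = h :: t := by
          cases hx : pvSplitDot rest with
          | nil => exact absurd hx (pvSplitDot_ne_nil rest)
          | cons h t => exact ⟨h, t, rfl⟩
        simp [pvSplitDot, heq]
      · have hpre : List.isPrefixOf ['.'] (c :: rest) = false := by
          simp [List.isPrefixOf]; exact fun h => hc h.symm
        simp only [PySem.Chars.splitOn.go, hpre, Bool.false_eq_true, if_false]
        rw [ih f (c :: cur) acc hf]
        obtain ⟨h, t, heq⟩ : ∃ h t, pvSplitDot rest = h :: t := by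
          cases hx : pvSplitDot rest with
          | nil => exact absurd hx (pvSplitDot_ne_nil rest)
          | cons h t => exact ⟨h, t, rfl⟩
        simp [pvSplitDot, hc, heq]

theorem pvSplitOn_eq (l : List Char) :
    PySem.Chars.splitOn l ['.'] = pvSplitDot l := by
  unfold PySem.Chars.splitOn
  rw [pvGo_eq l (l.length + 1) [] [] (by omega)]
  obtain ⟨h, t, heq⟩ : ∃ h t, pvSplitDot l = h :: t := by
    cases hx : pvSplitDot l with
    | nil => exact absurd hx (pvSplitDot_ne_nil l)
    | cons h t => exact ⟨h, t, rfl⟩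
  simp [heq]

theorem pvScanB_eq (cs : List Char) : ∀ (dots : Nat) (seg : Bool) (h : List Char) (t : List (List Char)),
    pvSplitDot cs = h :: t →
    pvScanB cs dots seg =
      (decide (dots + 1 + t.length = 3) && (seg || !h.isEmpty)
        && h.all PySem.Chars.isdigit && t.all PySem.Chars.strIsdigit) := by
  induction cs with
  | nil =>
    intro dots seg h t heq
    simp only [pvSplitDot] at heq
    obtain ⟨rfl, rfl⟩ : h = [] ∧ t = [] := by
      cases heq; exact ⟨rfl, rfl⟩
    by_cases hd : dots = 2 <;> simp [pvScanB, hd]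
  | cons c rest ih =>
    intro dots seg h t heq
    obtain ⟨h', t', heq'⟩ : ∃ h' t', pvSplitDot rest = h' :: t' := by
      cases hx : pvSplitDot rest with
      | nil => exact absurd hx (pvSplitDot_ne_nil rest)
      | cons a b => exact ⟨a, b, rfl⟩
    by_cases hc : c = '.'
    · subst hc
      simp only [pvSplitDot] at heq
      obtain ⟨rfl, rfl⟩ : h = [] ∧ t = pvSplitDot rest := by cases heq; exact ⟨rfl, rfl⟩
      rw [heq']
      by_cases hseg : seg = true
      · by_cases hdots : dots < 2
        · simp only [pvScanB, hseg, hdots, decide_true, Bool.and_self, if_true]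
          rw [ih (dots + 1) false h' t' heq']
          simp [PySem.Chars.strIsdigit, Bool.and_assoc,
            show dots + 1 + 1 + t'.length = dots + 1 + (t'.length + 1) from by omega]
          rfl
        · simp only [pvScanB, hseg, hdots, decide_false, Bool.and_false]
          have hne : dots + 1 + (t'.length + 1) ≠ 3 := by omega
          simp [hne]
      · simp at hseg
        simp [pvScanB, hseg]
    · simp only [pvSplitDot, if_neg hc, heq'] at heq
      obtain ⟨rfl, rfl⟩ : h = c :: h' ∧ t = t' := by cases heq; exact ⟨rfl, rfl⟩
      by_cases hdig : PySem.Chars.isdigit c = true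
      · simp only [pvScanB, if_neg hc, hdig, if_true]
        rw [ih dots true h' t heq']
        simp [hdig]
      · simp at hdig
        simp [pvScanB, hc, hdig]

theorem pvLoopA_eq (ps : List (List Char)) : pvLoopA ps = ps.all PySem.Chars.strIsdigit := by
  induction ps with
  | nil => rfl
  | cons p ps ih =>
    by_cases hp : PySem.Chars.strIsdigit p = true <;> simp [pvLoopA, hp, ih]

-- ===== VERDICT (by name: the statement is the Claim_ definition above) =====
theorem validate_version_format_py_spec : Claim_equal_validate_version_format_py := by
  intro version _
  unfold Spec_validate_version_format_py validate_version_format_py validate_version_format_py_alt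
  cases hcs : version.toList with
  | nil => simp [pvScanB]
  | cons c rest =>
    simp only [List.isEmpty_cons, Bool.false_eq_true, if_false]
    obtain ⟨h, t, heq⟩ : ∃ h t, pvSplitDot (c :: rest) = h :: t := by
      cases hx : pvSplitDot (c :: rest) with
      | nil => exact absurd hx (pvSplitDot_ne_nil _)
      | cons a b => exact ⟨a, b, rfl⟩
    rw [pvSplitOn_eq, heq, pvScanB_eq (c :: rest) 0 false h t heq, pvLoopA_eq]
    by_cases hlen : t.length + 1 = 3
    · simp [hlen, PySem.Chars.strIsdigit, Bool.and_assoc, show (0:Nat) + 1 + t.length = 3 by omega]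
    · have h3 : (0:Nat) + 1 + t.length ≠ 3 := by omega
      simp only [List.length_cons, List.all_cons]
      simp [h3]
      exact fun h2 => absurd h2 (by omega)
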